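-- pv_equiv track=rewrite | github.com/itsluanayall/xmm-thesis | Mrk421_RGS_lightcurves/tools.py | sort_rgs_list
-- ===== SOURCE A (Python) =====
-- def split_rgs_filename(filename):
--     """
--     Splits the RGS filname in substrings, each of which indicate a specific characteristic of the observation.
--     Returns the dictionary of the substrings.
--     """
--     n = [1, 10, 2, 1, 3, 6, 1, 3]  #subsets of the filename string
--     split_name = (([filename[sum(n[:i]):sum(n[:i+1])] for i in range(len(n))]))
--
--     instr = split_name[2]
--     exposure = split_name[3]
--     expo_number = split_name[4]
--     type_file = split_name[5]
--     order = split_name[6]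
--     source_number = split_name[7]
--
--     return {"instr":instr, "exposure": exposure, "expo_number":expo_number, "type_file":type_file,
--             "order":order, "source_number":source_number, "filename": filename}
--
-- def sort_rgs_list(l, variable='expo_number'):
--     """
--     This method is useful when there are more than two RGS exposures in the observation.
--     If this is the case, the exposures must be paired accordingly to their exposure number in order to
--     correctly use the rgslccorr SAS command, which extracts the background-subtracted lightcurves.
--     Given a list of rgs products of the same type (e.g. 'EVENLI' or 'SRCLI_') this function sorts the list according
--     to the 'variable' argument so that the list can be divided into pairs ready for the generation of the lightcurves.
--     The variable argument is the parameter according to which the list will be sorted, e.g. "expo_number".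
--     """
--
--     #Make a list of dictionaries associated to each event
--     l_dict = []
--     for ele in l:
--         l_dict.append(split_rgs_filename(ele))
--
--     #Sort the list according to the given variable
--     sorted_l_dict = sorted(l_dict, key=lambda k: k[variable])
--
--     #Reassemble the filenames and split the sorted list into pairs made up of a RGS1 and a RGS2
--     #with consecutive exposure numbers
--     sorted_l = []
--     for ele in sorted_l_dict:
--         sorted_l.append(ele['filename'])
--
--     return [sorted_l[x:x+2] for x in range(0, len(sorted_l), 2)]
-- ===== SOURCE B (Python) =====
-- _FIELDS = {"instr": (11, 13), "exposure": (13, 14), "expo_number": (14, 17),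
--            "type_file": (17, 23), "order": (23, 24), "source_number": (24, 27)}
--
--
-- def _rgs_key(filename, variable):
--     """The substring of the filename holding the requested field."""
--     if variable == "filename":
--         return filename
--     a, b = _FIELDS[variable]
--     return filename[a:b]
--
--
-- def _pairs(xs):
--     """Chunk a list into consecutive pairs, recursively."""
--     if not xs:
--         return []
--     return [xs[:2]] + _pairs(xs[2:])
--
--
-- def sort_rgs_list(l, variable='expo_number'):
--     """Group the filenames into buckets keyed by the requested field, walk the
--     distinct keys in increasing order concatenating the buckets (a stable
--     bucket sort), and chunk the result into pairs."""
--     buckets = {}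
--     for f in l:
--         buckets.setdefault(_rgs_key(f, variable), []).append(f)
--     flat = []
--     for k in sorted(buckets):
--         flat.extend(buckets[k])
--     return _pairs(flat)
-- ===== Notes on version B (the rewrite author's own statement) =====
-- stated objective: alternative
-- what changed: B replaces A's comparison sort over a parallel list of parsed dicts by a bucket group-by (dict mapping field value -> filenames in input order) concatenated over the sorted distinct keys, and chunks into pairs by recursion on the list instead of a range of slices.
import Mathlib
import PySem

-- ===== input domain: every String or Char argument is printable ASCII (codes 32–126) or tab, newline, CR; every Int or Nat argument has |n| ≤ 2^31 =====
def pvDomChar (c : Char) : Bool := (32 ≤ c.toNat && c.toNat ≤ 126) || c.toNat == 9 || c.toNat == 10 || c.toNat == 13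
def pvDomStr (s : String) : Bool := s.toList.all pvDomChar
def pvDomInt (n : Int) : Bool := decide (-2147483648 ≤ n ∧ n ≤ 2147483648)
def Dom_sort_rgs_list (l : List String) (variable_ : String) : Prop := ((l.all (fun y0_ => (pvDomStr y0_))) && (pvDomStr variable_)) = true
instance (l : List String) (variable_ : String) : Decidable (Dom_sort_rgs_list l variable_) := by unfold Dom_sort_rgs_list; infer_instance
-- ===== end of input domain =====

-- B replaces A's comparison sort over a list of parsed dicts by a bucket group-by
-- (dict key -> filenames) concatenated over the sorted distinct keys, and chunks
-- into pairs recursively instead of by a range of slices (objective: alternative).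


-- ===== PORT A =====
def split_rgs_filename (filename : String) : PySem.Dict String String :=
  let n : List Int := [1, 10, 2, 1, 3, 6, 1, 3]
  let split_name : List String :=
    (PySem.List.pyRange 0 (n.length : Int) 1).map (fun i =>
      PySem.Str.slice filename (some (PySem.List.slice n none (some i)).sum)
                               (some (PySem.List.slice n none (some (i + 1))).sum))
  let instr := PySem.List.pyGetD split_name 2 ""
  let exposure := PySem.List.pyGetD split_name 3 ""
  let expo_number := PySem.List.pyGetD split_name 4 ""
  let type_file := PySem.List.pyGetD split_name 5 ""
  let order := PySem.List.pyGetD split_name 6 ""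
  let source_number := PySem.List.pyGetD split_name 7 ""
  PySem.Dict.ofList [("instr", instr), ("exposure", exposure), ("expo_number", expo_number),
    ("type_file", type_file), ("order", order), ("source_number", source_number),
    ("filename", filename)]

def sort_rgs_list (l : List String) (variable_ : String) : List (List String) :=
  let l_dict := l.foldl (fun acc ele => acc ++ [split_rgs_filename ele]) []
  -- k[variable] raises KeyError when the key is absent; those inputs are excluded by Pre_,
  -- so the total form getD with default "" is used here
  let sorted_l_dict := PySem.List.sorted l_dict (fun k => k.getD variable_ "") false
  let sorted_l := sorted_l_dict.foldl (fun acc ele => acc ++ [ele.getD "filename" ""]) []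
  (PySem.List.pyRange 0 (sorted_l.length : Int) 2).map
    (fun x => PySem.List.slice sorted_l (some x) (some (x + 2)))

-- ===== PORT B =====
def pvRgsFields : PySem.Dict String (Int × Int) :=
  PySem.Dict.ofList [("instr", (11, 13)), ("exposure", (13, 14)), ("expo_number", (14, 17)),
    ("type_file", (17, 23)), ("order", (23, 24)), ("source_number", (24, 27))]

def pvRgsKey (filename variable_ : String) : String :=
  if variable_ == "filename" then filename
  else match pvRgsFields.get? variable_ with
    | some (a, b) => PySem.Str.slice filename (some a) (some b)
    | none => ""   -- _FIELDS[variable] raises KeyError here in Python; excluded by Pre_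

-- recursive pair chunking: _pairs(xs) = [] if not xs else [xs[:2]] + _pairs(xs[2:])
def pvPairs (xs : List String) : List (List String) :=
  if h : xs = [] then []
  else PySem.List.slice xs none (some 2) ::
       pvPairs (PySem.List.slice xs (some 2) none)
termination_by xs.length
decreasing_by
  rw [PySem.List.slice_from xs (by omega : (0:Int) ≤ 2)]
  have : xs.length ≠ 0 := fun h0 => h (List.eq_nil_of_length_eq_zero h0)
  simp only [List.length_drop]
  omega

def sort_rgs_list_alt (l : List String) (variable_ : String) : List (List String) :=
  let buckets := l.foldl
    (fun d f => d.modify (pvRgsKey f variable_) [] (fun g => g ++ [f])) PySem.Dict.empty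
  let flat := (PySem.List.sorted buckets.keys (fun k => k) false).foldl
    (fun acc k => acc ++ buckets.getD k []) []
  pvPairs flat

-- ===== PRECONDITION & SPEC =====
-- Pre_ excludes only inputs where A raises: a non-empty list with a variable that is not one of
-- the seven dict keys makes A's sort key raise KeyError (and B's _FIELDS lookup likewise).
def Pre_sort_rgs_list (l : List String) (variable_ : String) : Prop :=
  l = [] ∨ variable_ ∈ ["instr", "exposure", "expo_number", "type_file", "order",
                        "source_number", "filename"]
instance (l : List String) (variable_ : String) : Decidable (Pre_sort_rgs_list l variable_) := by
  unfold Pre_sort_rgs_list; infer_instance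

def pvWitness_sort_rgs_list : List String × String :=
  (["P0658801701R1S001EVENLI0000.FIT", "P0658801701R2S002EVENLI0000.FIT"], "expo_number")

def Spec_sort_rgs_list (l : List String) (variable_ : String) (out : List (List String)) : Prop := out = sort_rgs_list_alt l variable_
instance (l : List String) (variable_ : String) (out : List (List String)) : Decidable (Spec_sort_rgs_list l variable_ out) := by unfold Spec_sort_rgs_list; infer_instance

-- ===== CLAIM (what is proved, stated in full; the proofs are below) =====
def Claim_equal_sort_rgs_list : Prop := ∀ (l : List String) (variable_ : String), Dom_sort_rgs_list l variable_ → Pre_sort_rgs_list l variable_ → Spec_sort_rgs_list l variable_ (sort_rgs_list l variable_)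

-- ===== LEMMAS AND PROOFS =====

-- inserting a mapped element into a mapped list is the map of the insertion
theorem pvInsertBy_map {α β : Type} (g : α → β) (bef : β → β → Bool) (x : α) (ys : List α) :
    PySem.List.insertBy bef (g x) (ys.map g)
      = (PySem.List.insertBy (fun a b => bef (g a) (g b)) x ys).map g := by
  induction ys with
  | nil => rfl
  | cons y ys ih =>
      simp only [List.map, PySem.List.insertBy]
      split <;> simp_all

-- sorting a mapped list by key k is the map of sorting by k ∘ g (stability transported through map)
theorem pvSorted_map {α β κ : Type} [LT κ] [DecidableLT κ] (g : α → β) (k : β → κ) (l : List α) :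
    PySem.List.sorted (l.map g) k false
      = (PySem.List.sorted l (fun x => k (g x)) false).map g := by
  show (l.map g).foldl (fun acc x => PySem.List.insertBy (fun a b => decide (k a < k b)) x acc) []
      = (l.foldl (fun acc x => PySem.List.insertBy (fun a b => decide (k (g a) < k (g b))) x acc) []).map g
  have h : ∀ (l : List α) (acc : List α),
      (l.map g).foldl (fun acc x => PySem.List.insertBy (fun a b => decide (k a < k b)) x acc) (acc.map g)
        = (l.foldl (fun acc x => PySem.List.insertBy (fun a b => decide (k (g a) < k (g b))) x acc) acc).map g := by
    intro l
    induction l with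
    | nil => intro acc; rfl
    | cons x xs ih =>
        intro acc
        simp only [List.map, List.foldl]
        rw [pvInsertBy_map g (fun a b => decide (k a < k b)) x acc, ih]
  simpa using h l []

-- reassembling the filename from A's dict gives back the filename
theorem pvFilename_split (f : String) :
    (split_rgs_filename f).getD "filename" "" = f := rfl

-- for each admitted variable, A's dict lookup equals B's slice key
theorem pvKey_split (v f : String)
    (hv : v ∈ ["instr", "exposure", "expo_number", "type_file", "order",
               "source_number", "filename"]) :
    (split_rgs_filename f).getD v "" = pvRgsKey f v := by
  fin_cases hv <;> rfl

-- insertBy walks past a prefix the element is not placed before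
theorem pvInsertBy_append {α : Type} (bef : α → α → Bool) (x : α) (as bs : List α)
    (h : ∀ a ∈ as, bef x a = false) :
    PySem.List.insertBy bef x (as ++ bs) = as ++ PySem.List.insertBy bef x bs := by
  induction as with
  | nil => rfl
  | cons a as ih =>
      have h0 : bef x a = false := h a (by simp)
      simp only [List.cons_append, PySem.List.insertBy, h0, Bool.false_eq_true, if_false]
      rw [ih (fun a ha => h a (by simp [ha]))]

-- insertBy puts the element in front when it goes before everything
theorem pvInsertBy_front {α : Type} (bef : α → α → Bool) (x : α) (bs : List α)
    (h : ∀ b ∈ bs, bef x b = true) :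
    PySem.List.insertBy bef x bs = x :: bs := by
  cases bs with
  | nil => rfl
  | cons b bs => simp [PySem.List.insertBy, h b (by simp)]

-- inserting a new element into the bucket concatenation appends it to its own bucket
theorem pvInsertBy_buckets {α : Type} (key : α → String) (x : α) (l : List α) (ks : List String)
    (hs : ks.Pairwise (· < ·)) (hx : key x ∈ ks) :
    PySem.List.insertBy (fun a b => decide (key a < key b)) x
        (ks.flatMap (fun k => l.filter (fun y => key y == k)))
      = ks.flatMap (fun k => (l ++ [x]).filter (fun y => key y == k)) := by
  induction ks with
  | nil => simp at hx
  | cons k ks ih =>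
      have hk : ∀ k' ∈ ks, k < k' := (List.pairwise_cons.mp hs).1
      have hsk : ks.Pairwise (· < ·) := (List.pairwise_cons.mp hs).2
      simp only [List.flatMap_cons, List.filter_append]
      by_cases hxk : key x = k
      · -- x joins the first bucket; it is not placed before any equal key,
        -- and goes before every element of the later buckets
        have h1 : ∀ a ∈ l.filter (fun y => key y == k),
            (decide (key x < key a)) = false := by
          intro a ha
          have := eq_of_beq (List.mem_filter.mp ha).2
          simp [this, hxk]
        rw [pvInsertBy_append _ _ _ _ h1]
        have h2 : ∀ b ∈ ks.flatMap (fun k' => l.filter (fun y => key y == k')),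
            (decide (key x < key b)) = true := by
          intro b hb
          obtain ⟨k', hk', hbk⟩ := List.mem_flatMap.mp hb
          have := eq_of_beq (List.mem_filter.mp hbk).2
          simp only [this, hxk, decide_eq_true_eq]
          exact hk k' hk'
        rw [pvInsertBy_front _ _ _ h2]
        have hxl : List.filter (fun y => key y == k) [x] = [x] := by simp [hxk]
        have hrest : ∀ k' ∈ ks, List.filter (fun y => key y == k') [x] = [] := by
          intro k' hk'
          have : k ≠ k' := ne_of_lt (hk k' hk')
          simp [hxk, this]
        rw [hxl]
        have : (ks.flatMap fun k' => l.filter (fun y => key y == k')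
                  ++ List.filter (fun y => key y == k') [x])
             = ks.flatMap fun k' => l.filter (fun y => key y == k') := by
          apply List.flatMap_congr
          intro k' hk'
          rw [hrest k' hk', List.append_nil]
        simp_all
      · -- x belongs to a later bucket
        have hx' : key x ∈ ks := by
          rcases List.mem_cons.mp hx with h' | h'
          · exact absurd h' hxk
          · exact h'
        have h1 : ∀ a ∈ l.filter (fun y => key y == k),
            (decide (key x < key a)) = false := by
          intro a ha
          have hak : key a = k := eq_of_beq (List.mem_filter.mp ha).2
          have hlt : k < key x := hk _ hx'
          simp only [decide_eq_false_iff_not, hak]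
          exact fun h2 => absurd (lt_trans hlt h2) (lt_irrefl k)
        have hxl : List.filter (fun y => key y == k) [x] = [] := by simp [hxk]
        rw [hxl, List.append_nil, pvInsertBy_append _ _ _ _ h1, ih hsk hx']
        simp [List.filter_append]

-- stable sort as bucket sort: concatenate, over the strictly increasing key list,
-- the input elements of each key in input order
theorem pvBucketSort {α : Type} (key : α → String) (l : List α) (ks : List String)
    (hs : ks.Pairwise (· < ·)) (hmem : ∀ x ∈ l, key x ∈ ks) :
    PySem.List.sorted l key false
      = ks.flatMap (fun k => l.filter (fun y => key y == k)) := by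
  induction l using List.reverseRecOn with
  | nil => simp [PySem.List.sorted]
  | append_singleton t x ih =>
      rw [PySem.List.sorted_eq_foldl_insertBy, List.foldl_append]
      simp only [List.foldl_cons, List.foldl_nil]
      rw [← PySem.List.sorted_eq_foldl_insertBy,
          ih (fun y hy => hmem y (by simp [hy])),
          pvInsertBy_buckets key x t ks hs (hmem x (by simp))]

-- a positive-step range shifted by a constant
theorem pvPyRange_shift (a b c s : Int) (h : 0 < s) :
    PySem.List.pyRange (a + c) (b + c) s = (PySem.List.pyRange a b s).map (· + c) := by
  rw [PySem.List.pyRange_of_pos _ _ h, PySem.List.pyRange_of_pos _ _ h, List.map_map]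
  have h2 : b + c - (a + c) = b - a := by ring
  by_cases hab : a < b
  · rw [if_pos (by omega), if_pos hab, h2]
    exact List.map_congr_left (fun k _ => by simp [Function.comp]; ring)
  · rw [if_neg (by omega), if_neg hab]; rfl

-- peeling the first element off a positive-step range
theorem pvPyRange_cons (a b s : Int) (hs : 0 < s) (hab : a < b) :
    PySem.List.pyRange a b s = a :: PySem.List.pyRange (a + s) b s := by
  rw [PySem.List.pyRange_of_pos _ _ hs, PySem.List.pyRange_of_pos _ _ hs, if_pos hab]
  have hd : 0 ≤ b - a - 1 := by omega
  have hsplit : b - a + s - 1 = (b - a - 1) + s := by ring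
  have hdiv : (b - a + s - 1) / s = (b - a - 1) / s + 1 := by
    rw [hsplit]
    simpa using Int.add_mul_ediv_right (b - a - 1) 1 (by omega : s ≠ 0)
  have hnn : 0 ≤ (b - a - 1) / s := Int.ediv_nonneg hd (by omega)
  have hN : ((b - a + s - 1) / s).toNat = ((b - a - 1) / s).toNat + 1 := by omega
  rw [hN, List.range_succ_eq_map, List.map_cons, List.map_map]
  congr 1
  · ring_nf
  by_cases hb : a + s < b
  · rw [if_pos hb]
    have : b - (a + s) + s - 1 = b - a - 1 := by ring
    rw [this]
    exact List.map_congr_left (fun k _ => by simp [Function.comp]; ring)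
  · rw [if_neg hb]
    have : (b - a - 1) / s = 0 := by
      apply Int.ediv_eq_zero_of_lt hd; omega
    simp [this]

-- pvPairs of the empty list
theorem pvPairs_nil : pvPairs [] = [] := by rw [pvPairs]; simp

-- A's range-of-slices chunking equals B's recursive pair chunking
theorem pvChunk : ∀ (n : Nat) (xs : List String), xs.length = n →
    (PySem.List.pyRange 0 (xs.length : Int) 2).map
      (fun x => PySem.List.slice xs (some x) (some (x + 2))) = pvPairs xs := by
  intro n
  induction n using Nat.strong_induction_on with
  | _ n ih =>
    intro xs hn
    match xs with
    | [] =>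
        rw [pvPairs_nil]
        simp [PySem.List.pyRange_of_pos 0 0 (by omega : (0:Int) < 2)]
    | [a] =>
        rw [pvPairs]
        rw [dif_neg (by simp)]
        simp only [List.length_singleton, Nat.cast_one]
        rw [show PySem.List.pyRange 0 (1:Int) 2 = [0] from by decide]
        have h2 : PySem.List.slice [a] (some (2:Int)) none = [] := by
          rw [PySem.List.slice_from _ (by omega : (0:Int) ≤ 2)]; rfl
        rw [h2, pvPairs_nil, List.map_singleton]
        simp
    | a :: b :: t =>
        have hlen : ((a :: b :: t).length : Int) = (t.length : Int) + 2 := by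
          simp; omega
        rw [pvPairs, dif_neg (by simp)]
        have h2 : PySem.List.slice (a :: b :: t) (some (2:Int)) none = t := by
          rw [PySem.List.slice_from _ (by omega : (0:Int) ≤ 2)]; rfl
        rw [h2]
        rw [hlen, pvPyRange_cons 0 _ 2 (by omega) (by omega)]
        rw [List.map_cons]
        have hhead : PySem.List.slice (a :: b :: t) (some (0:Int)) (some (0 + 2))
            = PySem.List.slice (a :: b :: t) none (some 2) := by
          rw [PySem.List.slice_zero_start]; norm_num
        rw [hhead]
        congr 1
        have hsh : PySem.List.pyRange (0 + 2) ((t.length : Int) + 2) 2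
            = (PySem.List.pyRange 0 (t.length : Int) 2).map (· + 2) :=
          pvPyRange_shift 0 (t.length : Int) 2 2 (by omega)
        rw [show PySem.List.pyRange (0 + 2) ((t.length : Int) + 2) 2
              = PySem.List.pyRange 2 ((t.length : Int) + 2) 2 from by norm_num]
        norm_num at hsh
        rw [hsh, List.map_map]
        have hstep : ∀ x ∈ PySem.List.pyRange 0 (t.length : Int) 2,
            PySem.List.slice (a :: b :: t) (some (x + 2)) (some (x + 2 + 2))
              = PySem.List.slice t (some x) (some (x + 2)) := by
          intro x hx
          have hx0 : 0 ≤ x := (PySem.List.mem_pyRange_iff_of_pos (by omega) x).mp hx |>.1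
          rw [PySem.List.slice_toNat _ (by omega) (by omega),
              PySem.List.slice_toNat _ hx0 (by omega)]
          have e1 : (x + 2).toNat = x.toNat + 2 := by omega
          have e2 : (x + 2 + 2).toNat = x.toNat + 2 + 2 := by omega
          rw [e1, e2]
          have e3 : List.drop (x.toNat + 2) (a :: b :: t) = List.drop x.toNat t := rfl
          rw [e3]
          congr 1
          omega
        rw [List.map_congr_left (fun x hx => by
              simp only [Function.comp]
              exact hstep x hx)]
        exact ih t.length (by simp at hn ⊢; omega) t rfl

-- chunk lemma specialised to the list itself
theorem pvChunk' (xs : List String) :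
    (PySem.List.pyRange 0 (xs.length : Int) 2).map
      (fun x => PySem.List.slice xs (some x) (some (x + 2))) = pvPairs xs :=
  pvChunk xs.length xs rfl

-- the bucket dict looks up to a filter of the input
theorem pvBucketsGetD (l : List String) (variable_ : String) (c : String) :
    (l.foldl (fun d f => d.modify (pvRgsKey f variable_) []
        (fun g => g ++ [f])) PySem.Dict.empty).getD c []
      = l.filter (fun f => pvRgsKey f variable_ == c) := by
  have h : l.foldl (fun d f => d.modify (pvRgsKey f variable_) [] (fun g => g ++ [f]))
        PySem.Dict.empty
      = (l.map (fun f => (pvRgsKey f variable_, f))).foldl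
          (fun d p => d.modify p.1 [] (fun g => g ++ [p.2])) PySem.Dict.empty := by
    rw [List.foldl_map]
  rw [h, PySem.Dict.getD_foldl_modify_append, List.filter_map]
  simp [Function.comp_def]

-- the bucket dict's keys are the distinct keys of the input, in first-occurrence order
theorem pvBucketsKeys (l : List String) (variable_ : String) :
    (l.foldl (fun d f => d.modify (pvRgsKey f variable_) []
        (fun g => g ++ [f])) PySem.Dict.empty).keys
      = PySem.Set.ofList (l.map (fun f => pvRgsKey f variable_)) := by
  rw [PySem.Dict.keys_foldl_modify_key l (fun f => pvRgsKey f variable_) []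
      (fun _ x g => g ++ [x]) PySem.Dict.empty]
  rw [PySem.Set.ofList_eq_foldl]
  rfl

-- ===== VERDICT (by name: the statement is the Claim_ definition above) =====
theorem sort_rgs_list_spec : Claim_equal_sort_rgs_list := by
  intro l variable_ _ hpre
  show sort_rgs_list l variable_ = sort_rgs_list_alt l variable_
  rcases hpre with rfl | hv
  · show sort_rgs_list [] variable_ = sort_rgs_list_alt [] variable_
    unfold sort_rgs_list sort_rgs_list_alt
    simp [pvPairs_nil, PySem.List.sorted, show PySem.List.pyRange 0 0 2 = [] from by decide]
  · unfold sort_rgs_list sort_rgs_list_alt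
    simp only [PySem.List.foldl_append_singleton_eq_map, List.nil_append]
    rw [pvSorted_map split_rgs_filename (fun k => k.getD variable_ "") l, List.map_map]
    have hkey : (fun x => (split_rgs_filename x).getD variable_ "")
        = (fun f => pvRgsKey f variable_) := funext fun f => pvKey_split variable_ f hv
    rw [hkey]
    simp only [Function.comp_def, pvFilename_split]
    rw [pvChunk']
    congr 1
    rw [PySem.List.foldl_append_eq_flatMap, List.nil_append]
    simp only [pvBucketsGetD, pvBucketsKeys]
    rw [← pvBucketSort (fun f => pvRgsKey f variable_) l _
        (PySem.List.sorted_ofList_pairwise_lt _)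
        (fun x hx => (PySem.List.mem_sorted _ _ _ _).mpr
          ((PySem.Set.mem_ofList _ _).mpr (List.mem_map_of_mem hx)))]
    simp
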